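-- pv_equiv track=rewrite | github.com/paulklemstine/factor | pyth_theorem_v2.py | generate_by_depth
-- ===== SOURCE A (Python) =====
-- from collections import Counter, defaultdict
--
-- def berggren_matrices():
--     A = [[ 1,-2, 2],[ 2,-1, 2],[ 2,-2, 3]]
--     B = [[ 1, 2, 2],[ 2, 1, 2],[ 2, 2, 3]]
--     C = [[-1, 2, 2],[-2, 1, 2],[-2, 2, 3]]
--     return [A, B, C]
--
-- def mat_vec(M, v):
--     return [sum(M[i][j]*v[j] for j in range(3)) for i in range(3)]
--
-- def generate_by_depth(max_depth):
--     """Generate triples organized by depth. Returns dict: depth -> list of (a,b,c,path)."""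
--     mats = berggren_matrices()
--     labels = ['A', 'B', 'C']
--     root = [3, 4, 5]
--     by_depth = defaultdict(list)
--     by_depth[0].append((3, 4, 5, ''))
--     queue = [(root, '')]
--     for d in range(max_depth):
--         new_queue = []
--         for triple, path in queue:
--             for i, M in enumerate(mats):
--                 child = mat_vec(M, triple)
--                 child = [abs(x) for x in child]
--                 a, b, c = sorted(child[:2]) + [child[2]]
--                 new_path = path + labels[i]
--                 by_depth[d+1].append((a, b, c, new_path))
--                 new_queue.append(([a, b, c], new_path))
--         queue = new_queue
--     return by_depth
-- ===== SOURCE B (Python) =====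
-- from collections import defaultdict
--
-- def generate_by_depth(max_depth):
--     """Generate triples organized by depth. Returns dict: depth -> list of (a,b,c,path)."""
--     by_depth = defaultdict(list)
--     stack = [(3, 4, 5, '', 0)]
--     while stack:
--         a, b, c, path, depth = stack.pop()
--         by_depth[depth].append((a, b, c, path))
--         if depth < max_depth:
--             kids = []
--             for x, y, z, lab in (
--                     (abs(a - 2*b + 2*c), abs(2*a - b + 2*c), abs(2*a - 2*b + 3*c), 'A'),
--                     (abs(a + 2*b + 2*c), abs(2*a + b + 2*c), abs(2*a + 2*b + 3*c), 'B'),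
--                     (abs(-a + 2*b + 2*c), abs(-2*a + b + 2*c), abs(-2*a + 2*b + 3*c), 'C')):
--                 lo, hi = min(x, y), max(x, y)
--                 kids.append((lo, hi, z, path + lab, depth + 1))
--             stack += reversed(kids)
--     return by_depth
-- ===== Notes on version B (the rewrite author's own statement) =====
-- stated objective: alternative
-- what changed: Replaces the breadth-first queue-of-levels loop (rebuilding new_queue each round, with mat_vec generator sums, slicing and sorting every child) by an iterative pre-order DFS over an explicit stack that appends each popped node to its depth bucket and pushes its three closed-form children; left-to-right order makes every depth bucket identical.
import Mathlib
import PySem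

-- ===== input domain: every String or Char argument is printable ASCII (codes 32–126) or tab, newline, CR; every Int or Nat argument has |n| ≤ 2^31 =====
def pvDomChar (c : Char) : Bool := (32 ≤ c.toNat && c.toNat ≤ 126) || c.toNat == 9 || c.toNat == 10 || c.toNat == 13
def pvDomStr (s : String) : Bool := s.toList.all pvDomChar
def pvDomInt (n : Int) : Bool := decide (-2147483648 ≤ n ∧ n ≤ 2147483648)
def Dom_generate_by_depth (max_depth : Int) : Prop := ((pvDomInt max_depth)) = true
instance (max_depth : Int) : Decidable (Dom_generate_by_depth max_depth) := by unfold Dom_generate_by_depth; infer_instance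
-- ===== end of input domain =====

-- B replaces A's breadth-first queue of levels by an iterative pre-order DFS over an explicit
-- stack, appending each popped node to its depth bucket (matrix products in closed form);
-- objective: alternative traversal of the same tree, same asymptotic cost.

-- ===== PORT A =====
def pvBerggrenMats : List (List (List Int)) :=
  [[[1, -2, 2], [2, -1, 2], [2, -2, 3]],
   [[1, 2, 2], [2, 1, 2], [2, 2, 3]],
   [[-1, 2, 2], [-2, 1, 2], [-2, 2, 3]]]

def pvLabels : List String := ["A", "B", "C"]

def pvMatVec (M : List (List Int)) (v : List Int) : List Int :=
  -- indices are always in range here, so pyGetD's defaults are never used — exact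
  (PySem.List.pyRange 0 3 1).map (fun i =>
    ((PySem.List.pyRange 0 3 1).map (fun j =>
      PySem.List.pyGetD (PySem.List.pyGetD M i []) j 0 * PySem.List.pyGetD v j 0)).sum)

-- the body of A's innermost loop 'for i, M in enumerate(mats)'
def pvStepMat (d : Int) (tp : List Int × String)
    (st3 : PySem.Dict Int (List (Int × Int × Int × String)) × List (List Int × String))
    (iM : Int × List (List Int)) :
    PySem.Dict Int (List (Int × Int × Int × String)) × List (List Int × String) :=
  let child := pvMatVec iM.2 tp.1
  let child := child.map (fun x => |x|)
  let abc := PySem.List.sorted (PySem.List.slice child none (some 2)) id false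
              ++ [PySem.List.pyGetD child 2 0]
  let a := PySem.List.pyGetD abc 0 0
  let b := PySem.List.pyGetD abc 1 0
  let c := PySem.List.pyGetD abc 2 0
  let newPath := tp.2 ++ PySem.List.pyGetD pvLabels iM.1 ""
  (st3.1.modify (d + 1) [] (fun l => l ++ [(a, b, c, newPath)]),
   st3.2 ++ [([a, b, c], newPath)])

-- A's loop 'for triple, path in queue'
def pvStepTriple (d : Int)
    (st2 : PySem.Dict Int (List (Int × Int × Int × String)) × List (List Int × String))
    (tp : List Int × String) :
    PySem.Dict Int (List (Int × Int × Int × String)) × List (List Int × String) :=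
  (PySem.List.enumerate pvBerggrenMats).foldl (pvStepMat d tp) st2

-- A's loop 'for d in range(max_depth)'
def pvStepDepth
    (st : PySem.Dict Int (List (Int × Int × Int × String)) × List (List Int × String))
    (d : Int) :
    PySem.Dict Int (List (Int × Int × Int × String)) × List (List Int × String) :=
  st.2.foldl (pvStepTriple d) (st.1, [])

def generate_by_depth (max_depth : Int) : List (Int × List (Int × Int × Int × String)) :=
  let byd : PySem.Dict Int (List (Int × Int × Int × String)) :=
    PySem.Dict.empty.modify 0 [] (fun l => l ++ [(3, 4, 5, "")])
  let final := (PySem.List.pyRange 0 max_depth 1).foldl pvStepDepth (byd, [([3, 4, 5], "")])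
  final.1.items

-- ===== PORT B =====
-- the three closed-form labelled children of Source B's inner 'for' tuple
def pvChildren (t : Int × Int × Int × String) : List (Int × Int × Int × String) :=
  let a := t.1; let b := t.2.1; let c := t.2.2.1; let p := t.2.2.2
  let xa := |a - 2*b + 2*c|; let ya := |2*a - b + 2*c|; let za := |2*a - 2*b + 3*c|
  let xb := |a + 2*b + 2*c|; let yb := |2*a + b + 2*c|; let zb := |2*a + 2*b + 3*c|
  let xc := |-a + 2*b + 2*c|; let yc := |-2*a + b + 2*c|; let zc := |-2*a + 2*b + 3*c|
  [(min xa ya, max xa ya, za, p ++ "A"),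
   (min xb yb, max xb yb, zb, p ++ "B"),
   (min xc yc, max xc yc, zc, p ++ "C")]

-- termination measure for the while loop: weight of a node with r remaining levels
def pvWt : Nat → Nat
  | 0 => 1
  | r + 1 => 1 + 3 * pvWt r

lemma pvWt_pos (r : Nat) : 0 < pvWt r := by cases r <;> simp [pvWt]

-- Source B's 'while stack:' loop.  The Lean list holds the stack TOP FIRST (Python pops from the
-- end and extends with reversed(kids), so 'stack += reversed(kids)' is 'kids ++ rest' here);
-- termination is by the total weight of the stack, a ghost measure the loop itself never uses
def pvLoop (maxd : Int) :
    List ((Int × Int × Int × String) × Int) →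
    PySem.Dict Int (List (Int × Int × Int × String)) →
    PySem.Dict Int (List (Int × Int × Int × String))
  | [], D => D
  | (t, dep) :: rest, D =>
    let D1 := D.modify dep [] (fun l => l ++ [t])
    if _h : dep < maxd then
      pvLoop maxd ((pvChildren t).map (fun c => (c, dep + 1)) ++ rest) D1
    else
      pvLoop maxd rest D1
  termination_by S _ => (S.map (fun e => pvWt ((maxd - e.2).toNat))).sum
  decreasing_by
  · obtain ⟨a, b, c, p⟩ := t
    simp only [List.map_append, List.sum_append, List.map_cons, List.sum_cons, List.map_map,
      pvChildren]
    have hr : (maxd - dep).toNat = (maxd - (dep + 1)).toNat + 1 := by omega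
    rw [hr]
    simp [pvWt]
    omega
  · simp only [List.map_cons, List.sum_cons]
    have := pvWt_pos ((maxd - dep).toNat)
    omega

def generate_by_depth_alt (max_depth : Int) : List (Int × List (Int × Int × Int × String)) :=
  (pvLoop max_depth [((3, 4, 5, ""), 0)] PySem.Dict.empty).items

-- ===== PRECONDITION & SPEC =====
def Spec_generate_by_depth (max_depth : Int) (out : List (Int × List (Int × Int × Int × String))) : Prop := out = generate_by_depth_alt max_depth
instance (max_depth : Int) (out : List (Int × List (Int × Int × Int × String))) : Decidable (Spec_generate_by_depth max_depth out) := by unfold Spec_generate_by_depth; infer_instance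

-- ===== CLAIM (what is proved, stated in full; the proofs are below) =====
def Claim_equal_generate_by_depth : Prop := ∀ (max_depth : Int), Dom_generate_by_depth max_depth → Spec_generate_by_depth max_depth (generate_by_depth max_depth)

-- ===== LEMMAS AND PROOFS =====

-- recursive rendering of the DFS the stack loop performs (proof device)
def pvDfs (fuel : Nat) (d : Int) (t : Int × Int × Int × String)
    (D : PySem.Dict Int (List (Int × Int × Int × String))) :
    PySem.Dict Int (List (Int × Int × Int × String)) :=
  match fuel with
  | 0 => D
  | n + 1 =>
    (pvChildren t).foldl
      (fun D' c => pvDfs n (d + 1) c (D'.modify (d + 1) [] (fun l => l ++ [c]))) D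

-- the stack loop simulates the recursion, one subtree at a time
lemma pvLoop_sim (maxd : Int) : ∀ (n : Nat) (t : Int × Int × Int × String) (dep : Int)
    (rest : List ((Int × Int × Int × String) × Int))
    (D : PySem.Dict Int (List (Int × Int × Int × String))),
    (maxd - dep).toNat = n →
    pvLoop maxd ((t, dep) :: rest) D =
      pvLoop maxd rest (pvDfs n dep t (D.modify dep [] (fun l => l ++ [t]))) := by
  intro n
  induction n with
  | zero =>
    intro t dep rest D hn
    rw [pvLoop]
    have : ¬ dep < maxd := by omega
    simp [this, pvDfs]
  | succ n ih =>
    intro t dep rest D hn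
    rw [pvLoop]
    have hlt : dep < maxd := by omega
    simp only [hlt, dif_pos]
    -- fold the pushed children one subtree at a time
    have hfold : ∀ (cs : List (Int × Int × Int × String))
        (rest : List ((Int × Int × Int × String) × Int))
        (D1 : PySem.Dict Int (List (Int × Int × Int × String))),
        pvLoop maxd (cs.map (fun c => (c, dep + 1)) ++ rest) D1 =
          pvLoop maxd rest
            (cs.foldl (fun D' c => pvDfs n (dep + 1) c
              (D'.modify (dep + 1) [] (fun l => l ++ [c]))) D1) := by
      intro cs
      induction cs with
      | nil => intro rest D1; simp
      | cons c cs ihc =>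
        intro rest D1
        rw [List.map_cons, List.cons_append, ih c (dep + 1) _ D1 (by omega), ihc,
          List.foldl_cons]
    rw [hfold]
    rfl

-- BFS levels of the tree (the order A builds each bucket in)
def pvLvl : Nat → List (Int × Int × Int × String)
  | 0 => [(3, 4, 5, "")]
  | n + 1 => (pvLvl n).flatMap pvChildren

-- top-down levels of the subtree rooted at t (the pieces B's DFS appends)
def pvLv : (Int × Int × Int × String) → Nat → List (Int × Int × Int × String)
  | t, 0 => [t]
  | t, n + 1 => (pvChildren t).flatMap (fun c => pvLv c n)

def pvLvls (t : Int × Int × Int × String) (n : Nat) : List (List (Int × Int × Int × String)) :=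
  (List.range n).map (fun i => pvLv t (i + 1))

-- pointwise concatenation of level stacks
def pvMerge : List (List (Int × Int × Int × String)) → List (List (Int × Int × Int × String)) →
    List (List (Int × Int × Int × String))
  | [], ys => ys
  | x :: xs, [] => x :: xs
  | x :: xs, y :: ys => (x ++ y) :: pvMerge xs ys

-- level stack of a forest (left-to-right)
def pvForest : List (Int × Int × Int × String) → Nat → List (List (Int × Int × Int × String))
  | [], _ => []
  | c :: cs, n => pvMerge ((List.range (n + 1)).map (fun i => pvLv c i)) (pvForest cs n)

-- encode a level stack as dict items with consecutive keys from base
def pvEnc (base : Int) : List (List (Int × Int × Int × String)) →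
    List (Int × List (Int × Int × Int × String))
  | [] => []
  | l :: ls => (base, l) :: pvEnc (base + 1) ls

-- append x to the first level (creating it if absent)
def pvApp0 : List (List (Int × Int × Int × String)) → (Int × Int × Int × String) →
    List (List (Int × Int × Int × String))
  | [], x => [[x]]
  | l :: ls, x => (l ++ [x]) :: ls

-- A's queue entries are the level entries reshaped as ([a,b,c], path)
def pvToQ (e : Int × Int × Int × String) : List Int × String :=
  ([e.1, e.2.1, e.2.2.1], e.2.2.2)

-- A's buckets after n outer iterations
def pvBkts (n : Nat) : List (Int × List (Int × Int × Int × String)) :=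
  (List.range (n + 1)).map (fun i : Nat => ((i : Int), pvLvl i))

lemma pvChildren_ne_nil (e : Int × Int × Int × String) : pvChildren e ≠ [] := by
  obtain ⟨a, b, c, p⟩ := e; simp [pvChildren]

-- sorted of a two-element list
lemma pvSorted_pair (x y : Int) :
    PySem.List.sorted [x, y] id false = if y < x then [y, x] else [x, y] := by
  simp [PySem.List.sorted, PySem.List.insertBy]

lemma pvSortPair_minmax (x y : Int) :
    PySem.List.sorted [x, y] id false = [min x y, max x y] := by
  rw [pvSorted_pair]
  split_ifs with h <;> simp [min_def, max_def] <;> omega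

lemma pvMatVec_row (m11 m12 m13 m21 m22 m23 m31 m32 m33 a b c : Int) :
    pvMatVec [[m11, m12, m13], [m21, m22, m23], [m31, m32, m33]] [a, b, c] =
      [m11*a + m12*b + m13*c, m21*a + m22*b + m23*c, m31*a + m32*b + m33*c] := by
  have h3 : PySem.List.pyRange 0 3 1 = [0, 1, 2] := by decide
  simp [pvMatVec, h3, PySem.List.pyGetD, PySem.List.pyGet?, PySem.List.pyIdx?]
  refine ⟨by ring, by ring, by ring⟩

-- one matrix step of A's innermost loop, on a queue entry ([a,b,c], p)
lemma pvStepMat_eval (d : Int)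
    (st : PySem.Dict Int (List (Int × Int × Int × String)) × List (List Int × String))
    (a b c : Int) (p : String) (i : Int) (M : List (List Int)) (u v w : Int) (lab : String)
    (hvec : pvMatVec M [a, b, c] = [u, v, w])
    (hlab : PySem.List.pyGetD pvLabels i "" = lab) :
    pvStepMat d ([a, b, c], p) st (i, M) =
      (st.1.modify (d + 1) [] (fun l => l ++ [(min |u| |v|, max |u| |v|, |w|, p ++ lab)]),
       st.2 ++ [([min |u| |v|, max |u| |v|, |w|], p ++ lab)]) := by
  simp only [pvStepMat, hvec, hlab, List.map_cons, List.map_nil]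
  rw [PySem.List.slice_to _ (by norm_num)]
  simp [pvSortPair_minmax, PySem.List.pyGetD, PySem.List.pyGet?, PySem.List.pyIdx?]

-- one queue entry: the three-matrix loop appends exactly pvChildren e
lemma pvStepTriple_eq (d : Int) (D : PySem.Dict Int (List (Int × Int × Int × String)))
    (q : List (List Int × String)) (e : Int × Int × Int × String) :
    pvStepTriple d (D, q) (pvToQ e) =
      ((pvChildren e).foldl (fun D' x => D'.modify (d + 1) [] (fun l => l ++ [x])) D,
       q ++ (pvChildren e).map pvToQ) := by
  obtain ⟨a, b, c, p⟩ := e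
  have henum : PySem.List.enumerate pvBerggrenMats =
      [(0, [[1, -2, 2], [2, -1, 2], [2, -2, 3]]),
       (1, [[1, 2, 2], [2, 1, 2], [2, 2, 3]]),
       (2, [[-1, 2, 2], [-2, 1, 2], [-2, 2, 3]])] := by decide
  have hv1 : pvMatVec [[1, -2, 2], [2, -1, 2], [2, -2, 3]] [a, b, c] =
      [a - 2*b + 2*c, 2*a - b + 2*c, 2*a - 2*b + 3*c] := by
    rw [pvMatVec_row]; norm_num; omega
  have hv2 : pvMatVec [[1, 2, 2], [2, 1, 2], [2, 2, 3]] [a, b, c] =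
      [a + 2*b + 2*c, 2*a + b + 2*c, 2*a + 2*b + 3*c] := by
    rw [pvMatVec_row]; norm_num
  have hv3 : pvMatVec [[-1, 2, 2], [-2, 1, 2], [-2, 2, 3]] [a, b, c] =
      [-a + 2*b + 2*c, -2*a + b + 2*c, -2*a + 2*b + 3*c] := by
    rw [pvMatVec_row]; norm_num
  rw [pvStepTriple, pvToQ, henum]
  simp only [List.foldl_cons, List.foldl_nil]
  rw [pvStepMat_eval _ _ _ _ _ _ _ _ _ _ _ "A" hv1 (by decide),
      pvStepMat_eval _ _ _ _ _ _ _ _ _ _ _ "B" hv2 (by decide),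
      pvStepMat_eval _ _ _ _ _ _ _ _ _ _ _ "C" hv3 (by decide)]
  simp [pvChildren, pvToQ, List.foldl_cons]

-- the whole queue loop
lemma pvQueueFold_eq (d : Int) (es : List (Int × Int × Int × String))
    (D : PySem.Dict Int (List (Int × Int × Int × String))) (q : List (List Int × String)) :
    (es.map pvToQ).foldl (pvStepTriple d) (D, q) =
      ((es.flatMap pvChildren).foldl (fun D' x => D'.modify (d + 1) [] (fun l => l ++ [x])) D,
       q ++ (es.flatMap pvChildren).map pvToQ) := by
  induction es generalizing D q with
  | nil => simp
  | cons e es ih =>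
    rw [List.map_cons, List.foldl_cons, pvStepTriple_eq, ih]
    simp [List.flatMap_cons, List.foldl_append]

lemma pvFind_none {V : Type} (items : List (Int × V)) (K : Int)
    (h : ∀ p ∈ items, p.1 ≠ K) :
    items.find? (fun p => p.1 == K) = none := by
  rw [List.find?_eq_none]
  intro p hp
  simpa using h p hp

lemma pvGetD_absent {V : Type} (items : List (Int × V)) (K : Int)
    (h : ∀ p ∈ items, p.1 ≠ K) (dflt : V) :
    (PySem.Dict.mk items).getD K dflt = dflt := by
  simp [PySem.Dict.getD, PySem.Dict.get?, pvFind_none items K h]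

lemma pvGetD_mid {V : Type} (P : List (Int × V)) (K : Int) (l : V) (rest : List (Int × V))
    (h : ∀ p ∈ P, p.1 ≠ K) (dflt : V) :
    (PySem.Dict.mk (P ++ (K, l) :: rest)).getD K dflt = l := by
  simp [PySem.Dict.getD, PySem.Dict.get?, List.find?_append, pvFind_none P K h]

lemma pvInsert_mid {V : Type} (P : List (Int × V)) (K : Int) (l v : V) (rest : List (Int × V))
    (hP : ∀ p ∈ P, p.1 ≠ K) (hR : ∀ p ∈ rest, p.1 ≠ K) :
    (PySem.Dict.mk (P ++ (K, l) :: rest)).insert K v = PySem.Dict.mk (P ++ (K, v) :: rest) := by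
  have hc : (PySem.Dict.mk (P ++ (K, l) :: rest)).contains K = true := by
    simp [PySem.Dict.contains]
  simp only [PySem.Dict.insert, hc, if_true, List.map_append, List.map_cons]
  have hmapP : P.map (fun p => if (p.1 == K) = true then (K, v) else p) = P := by
    rw [List.map_congr_left (g := id) (fun p hp => by simp [hP p hp]), List.map_id]
  have hmapR : rest.map (fun p => if (p.1 == K) = true then (K, v) else p) = rest := by
    rw [List.map_congr_left (g := id) (fun p hp => by simp [hR p hp]), List.map_id]
  rw [hmapP, hmapR]
  simp

lemma pvInsert_absent {V : Type} (items : List (Int × V)) (K : Int) (v : V)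
    (h : ∀ p ∈ items, p.1 ≠ K) :
    (PySem.Dict.mk items).insert K v = PySem.Dict.mk (items ++ [(K, v)]) := by
  have hc : (PySem.Dict.mk items).contains K = false := by
    rw [PySem.Dict.contains, List.any_eq_false]
    intro p hp
    simpa using h p hp
  simp [PySem.Dict.insert, hc]

lemma pvMerge_nil_right (xs : List (List (Int × Int × Int × String))) : pvMerge xs [] = xs := by
  cases xs <;> rfl

lemma pvMerge_assoc (a b c : List (List (Int × Int × Int × String))) :
    pvMerge (pvMerge a b) c = pvMerge a (pvMerge b c) := by
  induction a generalizing b c with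
  | nil => rfl
  | cons x xs ih =>
    cases b with
    | nil => rfl
    | cons y ys =>
      cases c with
      | nil => rfl
      | cons z zs => simp [pvMerge, ih]

lemma pvMerge_map {α : Type} (l : List α)
    (f g : α → List (Int × Int × Int × String)) :
    pvMerge (l.map f) (l.map g) = l.map (fun i => f i ++ g i) := by
  induction l with
  | nil => rfl
  | cons x xs ih => simp [pvMerge, ih]

lemma pvKeys_enc (ls : List (List (Int × Int × Int × String))) :
    ∀ (base : Int) p, p ∈ pvEnc base ls → base ≤ p.1 := by
  induction ls with
  | nil => intro base p hp; simp [pvEnc] at hp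
  | cons l ls ih =>
    intro base p hp
    rcases List.mem_cons.1 hp with h | h
    · subst h; simp
    · have := ih (base + 1) p h; omega

-- appending to bucket K of a state P ++ pvEnc K Cs
lemma pvModify_enc (P : List (Int × List (Int × Int × Int × String))) (K : Int)
    (Cs : List (List (Int × Int × Int × String))) (x : Int × Int × Int × String)
    (hP : ∀ p ∈ P, p.1 ≠ K) :
    PySem.Dict.modify (PySem.Dict.mk (P ++ pvEnc K Cs)) K [] (fun l => l ++ [x]) =
      PySem.Dict.mk (P ++ pvEnc K (pvApp0 Cs x)) := by
  cases Cs with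
  | nil =>
    rw [PySem.Dict.modify]
    simp only [pvEnc, List.append_nil]
    rw [pvGetD_absent P K hP, pvInsert_absent P K _ hP]
    simp [pvApp0, pvEnc]
  | cons l ls =>
    rw [PySem.Dict.modify]
    simp only [pvEnc]
    have hR : ∀ p ∈ pvEnc (K + 1) ls, p.1 ≠ K := by
      intro p hp
      have := pvKeys_enc ls (K + 1) p hp; omega
    rw [pvGetD_mid P K l _ hP, pvInsert_mid P K l _ _ hP hR]
    simp [pvApp0, pvEnc]

-- one DFS child step merges ([c] :: levels of c) into the stack
lemma pvApp0_merge (Cs : List (List (Int × Int × Int × String)))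
    (c : Int × Int × Int × String) (n : Nat) :
    pvMerge (pvApp0 Cs c) (([] : List (Int × Int × Int × String)) :: pvLvls c n) =
      pvMerge Cs ([c] :: pvLvls c n) := by
  cases Cs with
  | nil => simp [pvApp0, pvMerge]
  | cons l ls => simp [pvApp0, pvMerge]

lemma pvRange_map_Lv (c : Int × Int × Int × String) (n : Nat) :
    (List.range (n + 1)).map (fun i => pvLv c i) = [c] :: pvLvls c n := by
  rw [List.range_succ_eq_map, List.map_cons, List.map_map]
  simp [pvLvls, pvLv, Function.comp]

-- the DFS invariant: with fuel n at depth d, buckets ≤ d (P) are untouched and the stack of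
-- buckets starting at d+1 (Cs) gains the levels of t's subtree, pointwise
lemma pvDfs_main : ∀ (n : Nat) (t : Int × Int × Int × String) (d : Int)
    (P : List (Int × List (Int × Int × Int × String)))
    (Cs : List (List (Int × Int × Int × String))),
    (∀ p ∈ P, p.1 ≤ d) →
    pvDfs n d t (PySem.Dict.mk (P ++ pvEnc (d + 1) Cs)) =
      PySem.Dict.mk (P ++ pvEnc (d + 1) (pvMerge Cs (pvLvls t n))) := by
  intro n
  induction n with
  | zero =>
    intro t d P Cs hP
    simp [pvDfs, pvLvls, pvMerge_nil_right]
  | succ n ih =>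
    -- fold over an arbitrary child list first
    have fold : ∀ (cs : List (Int × Int × Int × String)) (d : Int)
        (P : List (Int × List (Int × Int × Int × String)))
        (Cs : List (List (Int × Int × Int × String))),
        (∀ p ∈ P, p.1 ≤ d) →
        cs.foldl (fun D' c => pvDfs n (d + 1) c (D'.modify (d + 1) [] (fun l => l ++ [c])))
            (PySem.Dict.mk (P ++ pvEnc (d + 1) Cs)) =
          PySem.Dict.mk (P ++ pvEnc (d + 1) (pvMerge Cs (pvForest cs n))) := by
      intro cs
      induction cs with
      | nil =>
        intro d P Cs hP
        simp [pvForest, pvMerge_nil_right]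
      | cons c cs ihc =>
        intro d P Cs hP
        rw [List.foldl_cons]
        have hPne : ∀ p ∈ P, p.1 ≠ d + 1 := fun p hp => by have := hP p hp; omega
        rw [pvModify_enc P (d + 1) Cs c hPne]
        -- run the recursive DFS on child c: regroup the head bucket into P
        have hstep : pvDfs n (d + 1) c (PySem.Dict.mk (P ++ pvEnc (d + 1) (pvApp0 Cs c))) =
            PySem.Dict.mk (P ++ pvEnc (d + 1) (pvMerge Cs ([c] :: pvLvls c n))) := by
          cases hc : pvApp0 Cs c with
          | nil => cases Cs <;> simp [pvApp0] at hc
          | cons l0 ls =>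
            have hgroup : P ++ pvEnc (d + 1) (l0 :: ls) =
                (P ++ [(d + 1, l0)]) ++ pvEnc (d + 1 + 1) ls := by
              simp [pvEnc]
            rw [hgroup]
            have hP' : ∀ p ∈ P ++ [(d + 1, l0)], p.1 ≤ d + 1 := by
              intro p hp
              rcases List.mem_append.1 hp with h | h
              · have := hP p h; omega
              · simp at h; subst h; simp
            rw [ih c (d + 1) (P ++ [(d + 1, l0)]) ls hP']
            have hback : (P ++ [(d + 1, l0)]) ++ pvEnc (d + 1 + 1) (pvMerge ls (pvLvls c n)) =
                P ++ pvEnc (d + 1) (l0 :: pvMerge ls (pvLvls c n)) := by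
              simp [pvEnc]
            rw [hback]
            -- l0 :: pvMerge ls (pvLvls c n) = pvMerge (pvApp0 Cs c) ([] :: pvLvls c n)
            have : (l0 :: pvMerge ls (pvLvls c n)) =
                pvMerge (pvApp0 Cs c) (([] : List (Int × Int × Int × String)) :: pvLvls c n) := by
              rw [hc]; simp [pvMerge]
            rw [this, pvApp0_merge]
        rw [hstep, ihc d P _ hP, pvMerge_assoc]
        have hfc : pvForest (c :: cs) n = pvMerge ([c] :: pvLvls c n) (pvForest cs n) := by
          rw [pvForest, pvRange_map_Lv]
        rw [hfc]
    intro t d P Cs hP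
    rw [pvDfs]
    rw [fold (pvChildren t) d P Cs hP]
    -- pvForest (pvChildren t) n = pvLvls t (n+1)
    have hfor : ∀ (cs : List (Int × Int × Int × String)), cs ≠ [] →
        pvForest cs n = (List.range (n + 1)).map (fun i => cs.flatMap (fun c => pvLv c i)) := by
      intro cs
      induction cs with
      | nil => intro h; exact absurd rfl h
      | cons c cs ihc =>
        intro _
        cases cs with
        | nil => simp [pvForest, pvMerge_nil_right, List.flatMap_cons]
        | cons c' cs' =>
          rw [pvForest, ihc (by simp), pvMerge_map]
          simp [List.flatMap_cons]
    rw [hfor (pvChildren t) (pvChildren_ne_nil t)]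
    have : (List.range (n + 1)).map (fun i => (pvChildren t).flatMap (fun c => pvLv c i)) =
        pvLvls t (n + 1) := by
      apply List.map_congr_left
      intro i _
      rfl
    rw [this]

-- bottom-up = top-down levels
lemma pvLv_succ_flat : ∀ (k : Nat) (t : Int × Int × Int × String),
    pvLv t (k + 1) = (pvLv t k).flatMap pvChildren := by
  intro k
  induction k with
  | zero => intro t; simp [pvLv]
  | succ k ih =>
    intro t
    show (pvChildren t).flatMap (fun c => pvLv c (k + 1)) = _
    calc (pvChildren t).flatMap (fun c => pvLv c (k + 1))
        = (pvChildren t).flatMap (fun c => (pvLv c k).flatMap pvChildren) := by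
          exact List.flatMap_congr (fun c _ => ih c)
      _ = ((pvChildren t).flatMap (fun c => pvLv c k)).flatMap pvChildren := by
          rw [List.flatMap_assoc]
      _ = (pvLv t (k + 1)).flatMap pvChildren := rfl

lemma pvLvl_eq_Lv : ∀ k, pvLvl k = pvLv (3, 4, 5, "") k := by
  intro k
  induction k with
  | zero => rfl
  | succ k ih => rw [pvLvl, ih, ← pvLv_succ_flat]

lemma pvEnc_append (xs ys : List (List (Int × Int × Int × String))) :
    ∀ (b : Int), pvEnc b (xs ++ ys) = pvEnc b xs ++ pvEnc (b + xs.length) ys := by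
  induction xs with
  | nil => intro b; simp [pvEnc]
  | cons x xs ih =>
    intro b
    simp only [List.cons_append, pvEnc, ih (b + 1), List.length_cons]
    have : b + 1 + (xs.length : Int) = b + ((xs.length : Int) + 1) := by omega
    rw [this]
    push_cast
    ring_nf

lemma pvEnc_map_range (m : Nat) (b : Int) (f : Nat → List (Int × Int × Int × String)) :
    pvEnc b ((List.range m).map f) = (List.range m).map (fun i : Nat => ((b + i : Int), f i)) := by
  induction m with
  | zero => simp [pvEnc]
  | succ m ih =>
    rw [List.range_succ, List.map_append, pvEnc_append, ih, List.map_append]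
    simp [pvEnc]

-- B's DFS from the seeded dict produces exactly A's buckets
lemma pvB_final (n : Nat) :
    pvDfs n 0 (3, 4, 5, "") (PySem.Dict.mk [((0 : Int), [((3 : Int), 4, 5, "")])]) =
      PySem.Dict.mk (pvBkts n) := by
  have h := pvDfs_main n (3, 4, 5, "") 0 [((0 : Int), [((3 : Int), 4, 5, "")])] []
    (by intro p hp; simp at hp; subst hp; simp)
  simp only [pvEnc, List.append_nil] at h
  rw [h]
  have hm : pvMerge [] (pvLvls (3, 4, 5, "") n) = pvLvls (3, 4, 5, "") n := rfl
  rw [hm]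
  congr 1
  rw [pvLvls, pvEnc_map_range]
  rw [pvBkts, List.range_succ_eq_map, List.map_cons, List.map_map]
  have h0 : pvLvl 0 = [((3 : Int), 4, 5, "")] := rfl
  rw [h0]
  simp only [List.cons_append, List.nil_append]
  congr 1
  apply List.map_congr_left
  intro i _
  simp [pvLvl_eq_Lv, Function.comp]
  omega

-- ===== A side: per-iteration and whole-loop invariants (as before) =====
lemma pvBkts_key_ne (k : Nat) : ∀ p ∈ pvBkts k, p.1 ≠ (k : Int) + 1 := by
  intro p hp
  simp [pvBkts, List.mem_map] at hp
  obtain ⟨i, hi, hpi⟩ := hp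
  subst hpi
  simp
  omega

lemma pvBkts_succ (k : Nat) : pvBkts (k + 1) = pvBkts k ++ [((k : Int) + 1, pvLvl (k + 1))] := by
  simp [pvBkts, List.range_succ]

lemma pvLvl_ne_nil (n : Nat) : pvLvl n ≠ [] := by
  induction n with
  | zero => simp [pvLvl]
  | succ n ih =>
    cases h : pvLvl n with
    | nil => exact absurd h ih
    | cons x xs =>
      simp [pvLvl, h, List.flatMap_cons]
      intro hx
      exact absurd hx (pvChildren_ne_nil x)

lemma pvGetD_last {V : Type} (items : List (Int × V)) (K : Int) (acc : V)
    (h : ∀ p ∈ items, p.1 ≠ K) (dflt : V) :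
    (PySem.Dict.mk (items ++ [(K, acc)])).getD K dflt = acc := by
  simp [PySem.Dict.getD, PySem.Dict.get?, List.find?_append, pvFind_none items K h]

lemma pvInsert_last {V : Type} (items : List (Int × V)) (K : Int) (acc v : V)
    (h : ∀ p ∈ items, p.1 ≠ K) :
    (PySem.Dict.mk (items ++ [(K, acc)])).insert K v = PySem.Dict.mk (items ++ [(K, v)]) := by
  have hc : (PySem.Dict.mk (items ++ [(K, acc)])).contains K = true := by
    simp [PySem.Dict.contains]
  simp only [PySem.Dict.insert, hc, if_true, List.map_append]
  have hmap : items.map (fun p => if (p.1 == K) = true then (K, v) else p) = items := by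
    rw [List.map_congr_left (g := id) (fun p hp => by simp [h p hp]), List.map_id]
  rw [hmap]
  simp

lemma pvFoldl_modify_last (cs : List (Int × Int × Int × String))
    (items : List (Int × List (Int × Int × Int × String))) (K : Int)
    (acc : List (Int × Int × Int × String)) (h : ∀ p ∈ items, p.1 ≠ K) :
    cs.foldl (fun D' x => PySem.Dict.modify D' K [] (fun l => l ++ [x]))
        (PySem.Dict.mk (items ++ [(K, acc)])) =
      PySem.Dict.mk (items ++ [(K, acc ++ cs)]) := by
  induction cs generalizing acc with
  | nil => simp
  | cons x cs ih =>
    rw [List.foldl_cons]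
    have hm : PySem.Dict.modify (PySem.Dict.mk (items ++ [(K, acc)])) K [] (fun l => l ++ [x]) =
        PySem.Dict.mk (items ++ [(K, acc ++ [x])]) := by
      rw [PySem.Dict.modify, pvGetD_last items K acc h, pvInsert_last items K acc _ h]
    rw [hm, ih (acc ++ [x])]
    simp

-- one outer iteration, A side
lemma pvStepDepth_eq (k : Nat) :
    pvStepDepth (PySem.Dict.mk (pvBkts k), (pvLvl k).map pvToQ) (k : Int) =
      (PySem.Dict.mk (pvBkts (k + 1)), (pvLvl (k + 1)).map pvToQ) := by
  unfold pvStepDepth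
  rw [pvQueueFold_eq]
  have hlvl : (pvLvl k).flatMap pvChildren = pvLvl (k + 1) := rfl
  rw [hlvl]
  have hne := pvBkts_key_ne k
  cases hcs : pvLvl (k + 1) with
  | nil => exact absurd hcs (pvLvl_ne_nil (k + 1))
  | cons x cs =>
    rw [List.foldl_cons]
    have h1 : PySem.Dict.modify (PySem.Dict.mk (pvBkts k)) ((k : Int) + 1) [] (fun l => l ++ [x]) =
        PySem.Dict.mk (pvBkts k ++ [((k : Int) + 1, [x])]) := by
      rw [PySem.Dict.modify, pvGetD_absent _ _ hne, pvInsert_absent _ _ _ hne]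
      simp
    rw [h1, pvFoldl_modify_last cs _ _ [x] hne, pvBkts_succ, hcs]
    simp

-- A's outer fold
lemma pvA_inv (n : Nat) :
    (List.range n).foldl (fun st (k : Nat) => pvStepDepth st (k : Int))
        (PySem.Dict.mk (pvBkts 0), (pvLvl 0).map pvToQ) =
      (PySem.Dict.mk (pvBkts n), (pvLvl n).map pvToQ) := by
  induction n with
  | zero => simp
  | succ n ih => rw [List.range_succ, List.foldl_append, ih]; simpa using pvStepDepth_eq n

-- ===== VERDICT (by name: the statement is the Claim_ definition above) =====
theorem generate_by_depth_spec : Claim_equal_generate_by_depth := by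
  intro max_depth _
  unfold Spec_generate_by_depth generate_by_depth generate_by_depth_alt
  rw [PySem.List.pyRange_one]
  simp only [List.foldl_map, Int.sub_zero, Int.zero_add]
  have hA : PySem.Dict.mk [((0 : Int), [((3 : Int), (4 : Int), (5 : Int), "")])] =
      PySem.Dict.empty.modify 0 [] (fun l => l ++ [(3, 4, 5, "")]) := rfl
  rw [← hA]
  have h0b : pvBkts 0 = [((0 : Int), [((3 : Int), (4 : Int), (5 : Int), "")])] := by
    simp [pvBkts, pvLvl]
  have h0q : (pvLvl 0).map pvToQ = [([3, 4, 5], "")] := by simp [pvLvl, pvToQ]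
  rw [pvLoop_sim max_depth max_depth.toNat (3, 4, 5, "") 0 [] PySem.Dict.empty (by omega)]
  rw [pvLoop]
  rw [← hA, pvB_final]
  rw [← h0b, ← h0q]
  rw [pvA_inv]
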